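-- pv_equiv track=rewrite | github.com/csgrace/CPU_design | Test_scenario2_tc2_3_4_5.py | crc4_check
-- ===== SOURCE A (Python) =====
-- def crc4_check(data_bits):
--     """CRC-4 (X^4 + X + 1)"""
--     if len(data_bits) != 8:
--         return False
--
--     poly = 0b10011  # X^4 + X + 1
--     data = int(data_bits, 2)
--
--     for i in range(4):
--         if data & (1 << (7 - i)):
--             data ^= (poly << (3 - i))
--
--     return (data & 0b1111) == 0
-- ===== SOURCE B (Python) =====
-- def crc4_check(data_bits):
--     """CRC-4 (X^4 + X + 1), bit-serial LFSR register instead of in-place reduction"""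
--     if len(data_bits) != 8:
--         return False
--     reg = 0
--     for c in data_bits:
--         bit = "01".index(c)
--         fb = (reg >> 3) & 1
--         reg = ((reg << 1) | bit) & 0xF
--         if fb:
--             reg ^= 0b0011
--     return reg == 0
-- ===== Notes on version B (the rewrite author's own statement) =====
-- stated objective: idiomatic
-- what changed: Replaces the 4-step in-place polynomial reduction of the parsed byte with the standard bit-serial LFSR CRC: a 4-bit remainder register updated once per input bit, scanning the characters directly (no int parse of the whole string).
-- outside the precondition, e.g. on crc4_check('+1010101'): A returns False, B raises ValueError; on crc4_check('1010_101'): A returns False, B raises ValueError; on crc4_check('10101O10'): A raises ValueError, B raises ValueError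
import Mathlib
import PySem

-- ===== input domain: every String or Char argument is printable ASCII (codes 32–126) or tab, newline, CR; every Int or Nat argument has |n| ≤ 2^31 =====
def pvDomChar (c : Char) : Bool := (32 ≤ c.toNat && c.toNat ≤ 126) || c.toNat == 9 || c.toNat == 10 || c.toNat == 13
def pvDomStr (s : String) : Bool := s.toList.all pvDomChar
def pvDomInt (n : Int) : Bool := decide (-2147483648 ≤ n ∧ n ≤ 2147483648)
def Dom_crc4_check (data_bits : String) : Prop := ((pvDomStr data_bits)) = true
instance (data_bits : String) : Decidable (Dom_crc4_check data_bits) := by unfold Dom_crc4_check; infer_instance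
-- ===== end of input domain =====

-- B replaces A's 4-step in-place XOR reduction of the parsed byte by the standard
-- bit-serial LFSR CRC register scanned over the characters (idiomatic; same cost).


-- ===== PORT A =====
-- int(data_bits, 2): exact on strings of binary digit characters, the only length-8
-- strings Pre_crc4_check admits (all values are nonnegative, so Nat bit-ops match Python's)
def pvBin2 (l : List Char) : Nat :=
  l.foldl (fun a c => 2 * a + (if c = '1' then 1 else 0)) 0

def crc4_checkA (l : List Char) : Bool :=
  if l.length ≠ 8 then false
  else
    let poly : Nat := 19  -- 0b10011
    let data : Nat := pvBin2 l
    let data := (List.range 4).foldl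
      (fun data i => if data &&& (1 <<< (7 - i)) ≠ 0 then data ^^^ (poly <<< (3 - i)) else data)
      data
    decide (data &&& 15 = 0)

def crc4_check (data_bits : String) : Bool := crc4_checkA data_bits.toList

-- ===== PORT B =====
-- "01".index(c): exact on the binary digit characters Pre_crc4_check admits
def crc4_checkB (l : List Char) : Bool :=
  if l.length ≠ 8 then false
  else
    let reg := l.foldl
      (fun reg c =>
        let bit : Nat := if c = '1' then 1 else 0
        let fb := (reg >>> 3) &&& 1
        let reg := ((reg <<< 1) ||| bit) &&& 15
        if fb = 1 then reg ^^^ 3 else reg)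
      0
    decide (reg = 0)

def crc4_check_alt (data_bits : String) : Bool := crc4_checkB data_bits.toList

-- ===== PRECONDITION & SPEC =====
-- Pre_ excludes length-8 strings containing a non-binary-digit character: there
-- Python's int(data_bits, 2) either raises ValueError, or (for sign/space/underscore
-- variants) still parses while B's character scan raises ValueError.
def Pre_crc4_check (data_bits : String) : Prop :=
  data_bits.toList.length ≠ 8 ∨ (data_bits.toList.all (fun c => c == '0' || c == '1')) = true
instance (data_bits : String) : Decidable (Pre_crc4_check data_bits) := by
  unfold Pre_crc4_check; infer_instance

def pvWitness_crc4_check : String := "10110100"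

def Spec_crc4_check (data_bits : String) (out : Bool) : Prop := out = crc4_check_alt data_bits
instance (data_bits : String) (out : Bool) : Decidable (Spec_crc4_check data_bits out) := by
  unfold Spec_crc4_check; infer_instance

-- ===== CLAIM (what is proved, stated in full; the proofs are below) =====
def Claim_equal_crc4_check : Prop := ∀ (data_bits : String), Dom_crc4_check data_bits → Pre_crc4_check data_bits → Spec_crc4_check data_bits (crc4_check data_bits)

-- ===== LEMMAS AND PROOFS =====
theorem crc4_lists_agree (l : List Char) (h8 : l.length = 8)
    (hb : ∀ c ∈ l, c = '0' ∨ c = '1') : crc4_checkA l = crc4_checkB l := by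
  match l, h8 with
  | [a, b, c, d, e, f, g, h], _ =>
    have ha := hb a (by simp); have hbb := hb b (by simp)
    have hc := hb c (by simp); have hd := hb d (by simp)
    have he := hb e (by simp); have hf := hb f (by simp)
    have hg := hb g (by simp); have hh := hb h (by simp)
    rcases ha with rfl | rfl <;> rcases hbb with rfl | rfl <;>
      rcases hc with rfl | rfl <;> rcases hd with rfl | rfl <;>
      rcases he with rfl | rfl <;> rcases hf with rfl | rfl <;>
      rcases hg with rfl | rfl <;> rcases hh with rfl | rfl <;> decide

-- ===== VERDICT (by name: the statement is the Claim_ definition above) =====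
theorem crc4_check_spec : Claim_equal_crc4_check := by
  intro s _ hpre
  unfold Spec_crc4_check crc4_check crc4_check_alt
  rcases hpre with hne | hall
  · unfold crc4_checkA crc4_checkB
    rw [if_pos hne, if_pos hne]
  · have hb : ∀ c ∈ s.toList, c = '0' ∨ c = '1' := by simpa using hall
    by_cases h8 : s.toList.length = 8
    · exact crc4_lists_agree _ h8 hb
    · unfold crc4_checkA crc4_checkB
      rw [if_pos h8, if_pos h8]
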